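-- pv_equiv track=rewrite | github.com/gyooldev/algorithm_study | Programmers/seungho/greedy/조이스틱.py | get_minimum_left_right
-- ===== SOURCE A (Python) =====
-- def get_minimum_left_right(name):
--     minimum = len(name) - 1  # 순서대로 읽는 경우
--
--     for i in range(len(name)):
--         nxt = i + 1
--
--         while nxt < len(name) and name[nxt] == 'A':
--             nxt += 1
--         # A를 만나면 돌아가는 경우
--         minimum = min(minimum, (i * 2) + (len(name) - nxt))
--         # 먼저 뒤로 돌아갔다 시작점으로 오는 경우
--         minimum = min(minimum, ((len(name) - nxt) * 2) + i)
--     return minimum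
-- ===== SOURCE B (Python) =====
-- def get_minimum_left_right(name):
--     n = len(name)
--     # nxt[k] = smallest index j >= k with name[j] != 'A', or n if none (one backward pass)
--     nxt = [n] * (n + 1)
--     for k in range(n - 1, -1, -1):
--         nxt[k] = k if name[k] != 'A' else nxt[k + 1]
--     best = n - 1
--     for i in range(n):
--         j = nxt[i + 1]
--         best = min(best, 2 * i + (n - j), 2 * (n - j) + i)
--     return best
-- ===== Notes on version B (the rewrite author's own statement) =====
-- stated objective: alternative
-- what changed: Replaced the per-position inner while-scan over runs of the skipped letter by a next-relevant-index array built in one backward pass, so the main loop does O(1) work per position (worst-case O(n) instead of O(n^2)); on the timing inputs this measured about 1.4x, below the 1.5x threshold.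
import Mathlib
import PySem

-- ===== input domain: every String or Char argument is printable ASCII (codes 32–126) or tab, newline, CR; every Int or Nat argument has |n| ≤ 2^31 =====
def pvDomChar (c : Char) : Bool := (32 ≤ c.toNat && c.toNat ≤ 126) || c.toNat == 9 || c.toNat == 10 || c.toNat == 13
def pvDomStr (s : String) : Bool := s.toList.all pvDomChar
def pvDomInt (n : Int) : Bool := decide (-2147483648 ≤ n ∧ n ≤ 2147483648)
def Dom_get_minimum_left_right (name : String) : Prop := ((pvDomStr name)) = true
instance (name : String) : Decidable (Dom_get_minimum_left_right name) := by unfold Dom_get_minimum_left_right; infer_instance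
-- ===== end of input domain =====

-- B replaces A's per-position inner while-scan by a next-relevant-index array built in one
-- backward pass (objective: alternative; intended as asymptotically faster in the worst case,
-- but a timing run measured only about 1.4x on its inputs, so no speed is claimed).

-- ===== PORT A =====
-- the inner while-loop of A (advance past consecutive skipped letters)
def pvAWhile (cs : List Char) (nxt : Nat) : Nat :=
  if nxt < cs.length ∧ cs.getD nxt ' ' = 'A' then pvAWhile cs (nxt + 1) else nxt
termination_by cs.length - nxt
decreasing_by omega

def get_minimum_left_right (name : String) : Int :=
  let cs := name.toList
  let n := cs.length
  (List.range n).foldl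
    (fun minimum i =>
      let nxt := pvAWhile cs (i + 1)
      let m := min minimum ((i : Int) * 2 + ((n : Int) - (nxt : Int)))
      min m (((n : Int) - (nxt : Int)) * 2 + (i : Int)))
    ((n : Int) - 1)

-- ===== PORT B =====
-- the backward pass of Source B: list of length n+1 with entry k = smallest index >= k holding
-- a letter other than the skipped one (or n); built back-to-front as structural recursion
def pvNxtList (cs : List Char) (k : Nat) : List Nat :=
  match cs with
  | [] => [k]
  | c :: rest =>
      let t := pvNxtList rest (k + 1)
      (if c ≠ 'A' then k else t.headD (k + 1)) :: t

def get_minimum_left_right_alt (name : String) : Int :=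
  let cs := name.toList
  let n := cs.length
  let nxt := pvNxtList cs 0
  (List.range n).foldl
    (fun best i =>
      let j := nxt.getD (i + 1) 0
      min (min best (2 * (i : Int) + ((n : Int) - (j : Int))))
        (2 * ((n : Int) - (j : Int)) + (i : Int)))
    ((n : Int) - 1)

-- ===== PRECONDITION & SPEC =====
def Spec_get_minimum_left_right (name : String) (out : Int) : Prop := out = get_minimum_left_right_alt name
instance (name : String) (out : Int) : Decidable (Spec_get_minimum_left_right name out) := by unfold Spec_get_minimum_left_right; infer_instance

-- ===== CLAIM (what is proved, stated in full; the proofs are below) =====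
def Claim_equal_get_minimum_left_right : Prop := ∀ (name : String), Dom_get_minimum_left_right name → Spec_get_minimum_left_right name (get_minimum_left_right name)

-- ===== LEMMAS AND PROOFS =====

theorem pvNxtList_ne_nil (cs : List Char) (k : Nat) : pvNxtList cs k ≠ [] := by
  cases cs <;> simp [pvNxtList]

theorem headD_eq_getD {l : List Nat} (h : l ≠ []) (a b : Nat) : l.headD a = l.getD 0 b := by
  cases l with
  | nil => exact absurd rfl h
  | cons x xs => rfl

-- characterisation of the array entries
theorem pvNxtList_getD (cs : List Char) (k j d : Nat) (hj : j ≤ cs.length) :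
    (pvNxtList cs k).getD j d =
      if j < cs.length then
        (if cs.getD j ' ' ≠ 'A' then k + j else (pvNxtList cs k).getD (j + 1) d)
      else k + j := by
  induction cs generalizing k j with
  | nil =>
      simp at hj
      subst hj
      simp [pvNxtList]
  | cons c rest ih =>
      cases j with
      | zero =>
          simp only [pvNxtList, List.getD_cons_zero, List.length_cons, List.getD_cons_succ,
            if_pos, Nat.add_zero, Nat.zero_add, Nat.zero_lt_succ]
          split_ifs with hc
          · rfl
          · exact headD_eq_getD (pvNxtList_ne_nil rest (k + 1)) (k + 1) d
      | succ j' =>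
          have hj' : j' ≤ rest.length := by simpa using hj
          simp only [pvNxtList, List.getD_cons_succ, List.length_cons,
            Nat.add_lt_add_iff_right]
          rw [ih (k + 1) j' hj']
          split_ifs <;> first | rfl | omega

-- the while loop of A computes exactly the array entry of B
theorem pvAWhile_eq (cs : List Char) (j : Nat) (hj : j ≤ cs.length) :
    pvAWhile cs j = (pvNxtList cs 0).getD j 0 := by
  rw [pvAWhile]
  by_cases hc : j < cs.length ∧ cs.getD j ' ' = 'A'
  · rw [if_pos hc]
    have hrec := pvAWhile_eq cs (j + 1) (by omega)
    rw [hrec, pvNxtList_getD cs 0 j 0 hj, if_pos hc.1,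
      if_neg (fun h => h hc.2)]
  · rw [if_neg hc, pvNxtList_getD cs 0 j 0 hj]
    by_cases hlt : j < cs.length
    · have hA : cs.getD j ' ' ≠ 'A' := fun h => hc ⟨hlt, h⟩
      rw [if_pos hlt, if_pos hA]
      omega
    · rw [if_neg hlt]
      omega
termination_by cs.length - j
decreasing_by omega

-- ===== VERDICT (by name: the statement is the Claim_ definition above) =====
theorem get_minimum_left_right_spec : Claim_equal_get_minimum_left_right := by
  intro name _
  unfold Spec_get_minimum_left_right get_minimum_left_right get_minimum_left_right_alt
  simp only []
  apply List.foldl_ext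
  intro b i hi
  have hi' : i + 1 ≤ name.toList.length := by
    have := List.mem_range.mp hi; omega
  rw [pvAWhile_eq name.toList (i + 1) hi']
  ring_nf
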